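-- pv_equiv track=rewrite | github.com/justHman/NUTRI_TRACK | third_apis/OpenFoodFacts.py | _split_preserving_nesting
-- ===== SOURCE A (Python) =====
-- from typing import Any, Dict, List, Optional, Tuple
--
-- def _split_preserving_nesting(text: str) -> List[str]:
--     """
--     Split ingredients text on top-level commas, preserving nested parentheses and brackets.
--
--     Handles: (), [], and mixed nesting
--     """
--     tokens = []
--     depth = 0
--     current = []
--
--     for char in text:
--         if char in "([":
--             depth += 1
--             current.append(char)
--         elif char in ")]":
--             depth -= 1
--             current.append(char)
--         elif char in ",;" and depth == 0:
--             # Top-level comma/semicolon - split here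
--             token = "".join(current).strip()
--             if token:
--                 tokens.append(token)
--             current = []
--         else:
--             current.append(char)
--
--     # Don't forget the last token
--     token = "".join(current).strip()
--     if token:
--         tokens.append(token)
--
--     return tokens
-- ===== SOURCE B (Python) =====
-- def _split_preserving_nesting(text: str):
--     """Split on top-level commas/semicolons by repeatedly finding the first
--     top-level separator and cutting the string there (recursive decomposition
--     instead of a single-pass character accumulator)."""
--
--     def find_sep(s):
--         depth = 0
--         for i, ch in enumerate(s):
--             if ch in "([":
--                 depth += 1
--             elif ch in ")]":
--                 depth -= 1
--             elif ch in ",;" and depth == 0: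
--                 return i
--         return -1
--
--     out = []
--     while True:
--         i = find_sep(text)
--         if i == -1:
--             seg = text.strip()
--             if seg:
--                 out.append(seg)
--             return out
--         seg = text[:i].strip()
--         if seg:
--             out.append(seg)
--         text = text[i + 1:]
-- ===== Notes on version B (the rewrite author's own statement) =====
-- stated objective: alternative
-- what changed: Replaces the single-pass character-accumulator fold with a cut-at-first-top-level-separator loop: find_sep scans for the first separator at depth 0, the prefix is sliced off, stripped and emitted, and the remainder is processed again.
import Mathlib
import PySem

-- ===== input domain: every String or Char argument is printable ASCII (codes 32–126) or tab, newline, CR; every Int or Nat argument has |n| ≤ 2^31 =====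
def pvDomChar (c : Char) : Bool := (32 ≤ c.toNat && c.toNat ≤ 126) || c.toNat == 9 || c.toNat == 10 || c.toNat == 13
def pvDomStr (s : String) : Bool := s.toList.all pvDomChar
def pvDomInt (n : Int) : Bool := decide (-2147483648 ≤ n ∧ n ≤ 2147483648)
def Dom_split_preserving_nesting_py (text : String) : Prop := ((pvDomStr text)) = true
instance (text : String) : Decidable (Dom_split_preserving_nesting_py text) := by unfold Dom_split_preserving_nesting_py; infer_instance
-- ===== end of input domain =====

-- B replaces A's single-pass accumulator fold with a cut-at-first-top-level-separator loop (alternative decomposition, same behaviour).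

-- ===== PORT A =====
-- one step of A's for-loop over the characters; state = (tokens, depth, current)
def pvStepA (s : List String × Int × List Char) (c : Char) : List String × Int × List Char :=
  let (tokens, depth, current) := s
  if c = '(' ∨ c = '[' then (tokens, depth + 1, current ++ [c])
  else if c = ')' ∨ c = ']' then (tokens, depth - 1, current ++ [c])
  else if (c = ',' ∨ c = ';') ∧ depth = 0 then
    let token := PySem.Chars.strip current
    (if token ≠ [] then tokens ++ [String.ofList token] else tokens, depth, [])
  else (tokens, depth, current ++ [c])

def split_preserving_nesting_py (text : String) : List String :=
  let s := text.toList.foldl pvStepA ([], 0, [])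
  let token := PySem.Chars.strip s.2.2
  if token ≠ [] then s.1 ++ [String.ofList token] else s.1

-- ===== PORT B =====
-- B's find_sep: index of the first separator at depth 0, none = Python's -1
def pvFindSep : List Char → Int → Option Nat
  | [], _ => none
  | c :: cs, depth =>
    if c = '(' ∨ c = '[' then (pvFindSep cs (depth + 1)).map (· + 1)
    else if c = ')' ∨ c = ']' then (pvFindSep cs (depth - 1)).map (· + 1)
    else if (c = ',' ∨ c = ';') ∧ depth = 0 then some 0
    else (pvFindSep cs depth).map (· + 1)

-- B's while-loop: cut off the prefix before the first top-level separator, emit it, recurse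
def pvAltGo (l : List Char) (out : List String) : List String :=
  match h : pvFindSep l 0 with
  | none =>
    let seg := PySem.Chars.strip l
    if seg ≠ [] then out ++ [String.ofList seg] else out
  | some i =>
    let seg := PySem.Chars.strip (l.take i)
    pvAltGo (l.drop (i + 1)) (if seg ≠ [] then out ++ [String.ofList seg] else out)
termination_by l.length
decreasing_by
  cases l with
  | nil => simp [pvFindSep] at h
  | cons c cs => simp

def split_preserving_nesting_py_alt (text : String) : List String :=
  pvAltGo text.toList []

-- ===== PRECONDITION & SPEC =====
def Spec_split_preserving_nesting_py (text : String) (out : List String) : Prop := out = split_preserving_nesting_py_alt text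
instance (text : String) (out : List String) : Decidable (Spec_split_preserving_nesting_py text out) := by unfold Spec_split_preserving_nesting_py; infer_instance

-- ===== CLAIM (what is proved, stated in full; the proofs are below) =====
def Claim_equal_split_preserving_nesting_py : Prop := ∀ (text : String), Dom_split_preserving_nesting_py text → Spec_split_preserving_nesting_py text (split_preserving_nesting_py text)

-- ===== LEMMAS AND PROOFS =====

-- A's final "last token" step
def pvFinishA (s : List String × Int × List Char) : List String :=
  let token := PySem.Chars.strip s.2.2
  if token ≠ [] then s.1 ++ [String.ofList token] else s.1

-- depth after scanning a list, starting from d (shared by both programs)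
def pvDepthAfter : List Char → Int → Int
  | [], d => d
  | c :: cs, d =>
    pvDepthAfter cs (if c = '(' ∨ c = '[' then d + 1 else if c = ')' ∨ c = ']' then d - 1 else d)

-- tokens already collected stay a prefix of A's fold result
theorem foldA_tokens_prefix (l : List Char) (t : List String) (d : Int) (cur : List Char) :
    l.foldl pvStepA (t, d, cur) =
      (t ++ (l.foldl pvStepA ([], d, cur)).1, (l.foldl pvStepA ([], d, cur)).2) := by
  induction l generalizing t d cur with
  | nil => simp
  | cons c cs ih =>
    simp only [List.foldl_cons, pvStepA]
    split_ifs with h1 h2 h3 h4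
    · rw [ih]
    · rw [ih]
    · simp only [List.nil_append]
      rw [ih, ih [String.ofList (PySem.Chars.strip cur)] d []]; simp
    · rw [ih]
    · rw [ih]

theorem finishA_append (t a : List String) (p : Int × List Char) :
    pvFinishA (t ++ a, p) = t ++ pvFinishA (a, p) := by
  simp only [pvFinishA]
  split <;> simp

-- if find_sep finds nothing, A's fold just appends every char to current
theorem foldA_of_findSep_none (l : List Char) (t : List String) (d : Int) (cur : List Char)
    (h : pvFindSep l d = none) :
    l.foldl pvStepA (t, d, cur) = (t, pvDepthAfter l d, cur ++ l) := by
  induction l generalizing d cur with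
  | nil => simp [pvDepthAfter]
  | cons c cs ih =>
    simp only [pvFindSep] at h
    simp only [List.foldl_cons, pvStepA, pvDepthAfter]
    split_ifs at h ⊢ with h1 h2 h3
    all_goals rw [ih _ _ (by simpa using h)]; simp

-- a successful find_sep decomposes the list at the first top-level separator
theorem findSep_some (l : List Char) (d : Int) (i : Nat)
    (h : pvFindSep l d = some i) :
    ∃ pre c rest, l = pre ++ c :: rest ∧ pre.length = i ∧ (c = ',' ∨ c = ';') ∧
      pvFindSep pre d = none ∧ pvDepthAfter pre d = 0 := by
  induction l generalizing d i with
  | nil => simp [pvFindSep] at h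
  | cons c cs ih =>
    simp only [pvFindSep] at h
    split_ifs at h with h1 h2 h3
    · obtain ⟨j, hj, rfl⟩ := Option.map_eq_some_iff.mp h
      obtain ⟨pre, c', rest, rfl, hlen, hc, hn, hd⟩ := ih _ _ hj
      exact ⟨c :: pre, c', rest, by simp, by simp [hlen], hc,
        by simp [pvFindSep, h1, hn], by simp [pvDepthAfter, h1, hd]⟩
    · obtain ⟨j, hj, rfl⟩ := Option.map_eq_some_iff.mp h
      obtain ⟨pre, c', rest, rfl, hlen, hc, hn, hd⟩ := ih _ _ hj
      exact ⟨c :: pre, c', rest, by simp, by simp [hlen], hc,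
        by simp [pvFindSep, h1, h2, hn], by simp [pvDepthAfter, h1, h2, hd]⟩
    · obtain rfl : (0 : Nat) = i := Option.some.inj h
      exact ⟨[], c, cs, by simp, rfl, h3.1, by simp [pvFindSep], by simp [pvDepthAfter, h3.2]⟩
    · obtain ⟨j, hj, rfl⟩ := Option.map_eq_some_iff.mp h
      obtain ⟨pre, c', rest, rfl, hlen, hc, hn, hd⟩ := ih _ _ hj
      exact ⟨c :: pre, c', rest, by simp, by simp [hlen], hc,
        by simp [pvFindSep, h1, h2, h3, hn], by simp [pvDepthAfter, h1, h2, hd]⟩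

-- unfolding equations for pvAltGo (its match is dependent, so we state them once)
theorem pvAltGo_eq_none (l : List Char) (out : List String) (h : pvFindSep l 0 = none) :
    pvAltGo l out = if PySem.Chars.strip l ≠ [] then out ++ [String.ofList (PySem.Chars.strip l)] else out := by
  rw [pvAltGo]
  split <;> simp_all

theorem pvAltGo_eq_some (l : List Char) (out : List String) (i : Nat) (h : pvFindSep l 0 = some i) :
    pvAltGo l out = pvAltGo (l.drop (i + 1))
      (if PySem.Chars.strip (l.take i) ≠ [] then out ++ [String.ofList (PySem.Chars.strip (l.take i))] else out) := by
  rw [pvAltGo]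
  split
  · simp_all
  · rename_i i' h'
    rw [h] at h'
    cases h'
    rfl

-- B's out accumulator is a prefix of its result
theorem pvAltGo_out (l : List Char) (out : List String) :
    pvAltGo l out = out ++ pvAltGo l [] := by
  induction hn : l.length using Nat.strong_induction_on generalizing l out with
  | _ n ih =>
  cases h : pvFindSep l 0 with
  | none => rw [pvAltGo_eq_none _ _ h, pvAltGo_eq_none _ _ h]; split <;> simp
  | some i =>
    obtain ⟨pre, c, rest, rfl, hlen, -, -, -⟩ := findSep_some l 0 i h
    have hlt : ((pre ++ c :: rest).drop (i + 1)).length < n := by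
      subst hn; simp
    rw [pvAltGo_eq_some _ _ _ h, pvAltGo_eq_some _ [] _ h]
    rw [ih _ hlt _ (if PySem.Chars.strip ((pre ++ c :: rest).take i) ≠ [] then
          out ++ [String.ofList (PySem.Chars.strip ((pre ++ c :: rest).take i))] else out) rfl,
        ih _ hlt _ (if PySem.Chars.strip ((pre ++ c :: rest).take i) ≠ [] then
          [] ++ [String.ofList (PySem.Chars.strip ((pre ++ c :: rest).take i))] else []) rfl]
    split <;> simp

theorem main_equiv (l : List Char) :
    pvFinishA (l.foldl pvStepA ([], 0, [])) = pvAltGo l [] := by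
  induction hn : l.length using Nat.strong_induction_on generalizing l with
  | _ n ih =>
  cases h : pvFindSep l 0 with
  | none =>
    rw [pvAltGo_eq_none _ _ h, foldA_of_findSep_none l [] 0 [] h]
    simp [pvFinishA]
  | some i =>
    obtain ⟨pre, c, rest, rfl, hlen, hc, hnone, hdep⟩ := findSep_some l 0 i h
    have htake : (pre ++ c :: rest).take i = pre := by subst hlen; simp
    have hdrop : (pre ++ c :: rest).drop (i + 1) = rest := by subst hlen; simp
    rw [pvAltGo_eq_some _ _ _ h, htake, hdrop]
    rw [List.foldl_append, foldA_of_findSep_none pre [] 0 [] hnone, hdep]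
    simp only [List.foldl_cons, List.nil_append]
    have hstep : pvStepA ([], 0, pre) c =
        (if PySem.Chars.strip pre ≠ [] then [String.ofList (PySem.Chars.strip pre)] else [], 0, []) := by
      rcases hc with rfl | rfl <;> simp [pvStepA]
    rw [hstep, foldA_tokens_prefix rest _ 0 [], finishA_append]
    have hrest : pvFinishA (rest.foldl pvStepA ([], 0, [])) = pvAltGo rest [] := by
      have hlt : rest.length < n := by subst hn; simp; omega
      exact ih _ hlt rest rfl
    rw [show ((rest.foldl pvStepA ([], 0, [])).1, (rest.foldl pvStepA ([], 0, [])).2) =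
          rest.foldl pvStepA ([], 0, []) from rfl, hrest]
    split <;> simp [pvAltGo_out rest [String.ofList (PySem.Chars.strip pre)]]

-- ===== VERDICT (by name: the statement is the Claim_ definition above) =====
theorem split_preserving_nesting_py_spec : Claim_equal_split_preserving_nesting_py := by
  intro text _
  unfold Spec_split_preserving_nesting_py split_preserving_nesting_py split_preserving_nesting_py_alt
  simpa [pvFinishA] using main_equiv text.toList
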